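-- pv_equiv track=rewrite | github.com/azaj01/openstation | src/openstation/tasks.py | group_tasks_for_display
-- ===== SOURCE A (Python) =====
-- def group_tasks_for_display(tasks):
--     """Order tasks so subtasks appear grouped under their parent.
--
--     Returns a list of (task_dict, depth) tuples where depth is an
--     integer: 0 for top-level, 1 for direct children, 2 for
--     grandchildren, etc.
--     """
--     by_name = {t["name"]: t for t in tasks}
--     children = {}
--     for t in tasks:
--         parent = t.get("parent", "")
--         if parent and parent in by_name:
--             children.setdefault(parent, []).append(t)
--
--     top_level = [t for t in tasks
--                  if not t.get("parent", "") or t["parent"] not in by_name]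
--     top_level.sort(key=lambda t: t["id"])
--
--     def collect_descendants(name, depth):
--         kids = children.get(name, [])
--         kids.sort(key=lambda c: c["id"])
--         result = []
--         for child in kids:
--             result.append((child, depth))
--             result.extend(collect_descendants(child["name"], depth + 1))
--         return result
--
--     result = []
--     for t in top_level:
--         result.append((t, 0))
--         result.extend(collect_descendants(t["name"], 1))
--     return result
-- ===== SOURCE B (Python) =====
-- def group_tasks_for_display(tasks):
--     """Same ordering as A, but with an iterative explicit-stack DFS
--     instead of recursive descendant collection."""
--     by_name = {t["name"]: t for t in tasks}
--     children = {}
--     for t in tasks: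
--         parent = t.get("parent", "")
--         if parent and parent in by_name:
--             children.setdefault(parent, []).append(t)
--
--     top_level = [t for t in tasks
--                  if not t.get("parent", "") or t["parent"] not in by_name]
--     top_level.sort(key=lambda t: t["id"])
--
--     result = []
--     stack = [(t, 0) for t in reversed(top_level)]
--     while stack:
--         task, depth = stack.pop()
--         result.append((task, depth))
--         kids = sorted(children.get(task["name"], []), key=lambda c: c["id"])
--         stack.extend((c, depth + 1) for c in reversed(kids))
--     return result
-- ===== Notes on version B (the rewrite author's own statement) =====
-- stated objective: alternative
-- what changed: The recursive collect_descendants helper is replaced by an iterative pre-order DFS over an explicit stack of (task, depth) frames, seeded with the reversed id-sorted top-level tasks and pushing each node's reversed id-sorted children.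
import Mathlib
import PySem

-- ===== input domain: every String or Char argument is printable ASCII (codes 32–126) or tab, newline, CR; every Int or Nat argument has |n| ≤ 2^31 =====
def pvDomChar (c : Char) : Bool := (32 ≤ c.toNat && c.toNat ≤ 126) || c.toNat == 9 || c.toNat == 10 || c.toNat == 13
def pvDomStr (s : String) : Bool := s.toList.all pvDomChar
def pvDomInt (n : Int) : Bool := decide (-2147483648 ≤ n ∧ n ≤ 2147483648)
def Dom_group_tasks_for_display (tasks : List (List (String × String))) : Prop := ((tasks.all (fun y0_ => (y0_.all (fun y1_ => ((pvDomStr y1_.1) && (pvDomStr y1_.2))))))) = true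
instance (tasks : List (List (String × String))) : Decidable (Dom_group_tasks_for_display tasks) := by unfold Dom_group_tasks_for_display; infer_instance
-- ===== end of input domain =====

-- B replaces A's recursive collect_descendants with an iterative pre-order DFS over an
-- explicit stack of (task, depth) frames (objective: alternative decomposition, same cost).
-- Equivalence is about the RETURN value only (A sorts its internal lists in place, which is
-- not observable through the arguments).

-- ===== PORT A =====
-- shared index-building helpers: both Pythons build by_name / children / the sorted
-- top-level list with literally the same lines, so both ports use these definitions.
def pvTGetD (t : List (String × String)) (k dflt : String) : String :=
  (PySem.Dict.mk t).getD k dflt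

def pvParentOf (t : List (String × String)) : String := pvTGetD t "parent" ""

-- by_name = {t["name"]: t for t in tasks}   (t["name"] ported as getD; Pre_ requires the key)
def pvByName (tasks : List (List (String × String))) : PySem.Dict String (List (String × String)) :=
  tasks.foldl (fun d t => d.insert (pvTGetD t "name" "") t) PySem.Dict.empty

-- children.setdefault(parent, []).append(t) for valid parents
def pvChildren (tasks : List (List (String × String))) : PySem.Dict String (List (List (String × String))) :=
  tasks.foldl (fun d t =>
    if pvParentOf t != "" && (pvByName tasks).contains (pvParentOf t) then
      d.modify (pvParentOf t) [] (· ++ [t])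
    else d) PySem.Dict.empty

-- top_level filtered then sorted by t["id"] (stable)
def pvTopLevel (tasks : List (List (String × String))) : List (List (String × String)) :=
  PySem.List.sorted
    (tasks.filter (fun t => pvParentOf t == "" || !((pvByName tasks).contains (pvParentOf t))))
    (fun t => pvTGetD t "id" "") false

-- children.get(name, []) sorted by c["id"] (stable)
def pvKids (tasks : List (List (String × String))) (name : String) : List (List (String × String)) :=
  PySem.List.sorted ((pvChildren tasks).getD name []) (fun c => pvTGetD c "id" "") false

-- a bound the B-side stack loop cites for termination
lemma pvChildren_getD_length (tasks : List (List (String × String))) (c : String) :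
    (((pvChildren tasks).getD c []).length ≤ tasks.length) := by
  unfold pvChildren
  have H : ∀ (l : List (List (String × String))) (d : PySem.Dict String (List (List (String × String)))),
      ((l.foldl (fun d t =>
        if pvParentOf t != "" && (pvByName tasks).contains (pvParentOf t) then
          d.modify (pvParentOf t) [] (· ++ [t])
        else d) d).getD c []).length ≤ (d.getD c []).length + l.length := by
    intro l
    induction l with
    | nil => intro d; simp
    | cons t rest ih =>
      intro d
      simp only [List.foldl_cons, List.length_cons]
      by_cases h : (pvParentOf t != "" && (pvByName tasks).contains (pvParentOf t)) = true
      · rw [if_pos h]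
        have := ih (d.modify (pvParentOf t) [] (· ++ [t]))
        rw [PySem.Dict.getD_modify] at this
        by_cases hc : c = pvParentOf t
        · subst hc
          rw [if_pos rfl] at this
          simp only [List.length_append, List.length_cons, List.length_nil] at this
          omega
        · rw [if_neg hc] at this; omega
      · rw [if_neg h]
        have := ih d; omega
  have := H tasks PySem.Dict.empty
  simp only [PySem.Dict.getD_empty, List.length_nil] at this
  omega

lemma pvKids_length_le (tasks : List (List (String × String))) (name : String) :
    (pvKids tasks name).length ≤ tasks.length := by
  unfold pvKids
  rw [PySem.List.length_sorted]
  exact pvChildren_getD_length tasks name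

-- collect_descendants(name, depth), fuel added as the standard device for the
-- (in Python unbounded) recursion on names; tasks.length + 1 fuel is passed at the top.
def pvCollectA (tasks : List (List (String × String))) :
    Nat → String → Int → List ((List (String × String)) × Int)
  | 0, _, _ => []
  | Nat.succ f, name, depth =>
      (pvKids tasks name).foldl
        (fun r c => (r ++ [(c, depth)]) ++ pvCollectA tasks f (pvTGetD c "name" "") (depth + 1)) []

def group_tasks_for_display (tasks : List (List (String × String))) : List ((List (String × String)) × Int) :=
  (pvTopLevel tasks).foldl
    (fun r t => (r ++ [(t, (0 : Int))]) ++ pvCollectA tasks (tasks.length + 1) (pvTGetD t "name" "") 1) []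

-- ===== PORT B =====
-- the while-stack loop of Source B; the stack top is the list HEAD here (python keeps the top
-- at the END and extends with reversed(kids), which is the same traversal order); each frame
-- carries the fuel its children inherit — the same termination device as pvCollectA.
def pvRunB (tasks : List (List (String × String))) :
    List ((List (String × String)) × Int × Nat) → List ((List (String × String)) × Int) →
    List ((List (String × String)) × Int)
  | [], acc => acc
  | (t, d, f) :: rest, acc =>
      pvRunB tasks
        ((match f with
          | 0 => []
          | Nat.succ f' => (pvKids tasks (pvTGetD t "name" "")).map (fun c => (c, d + 1, f'))) ++ rest)
        (acc ++ [(t, d)])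
termination_by st _ => (st.map (fun e => (tasks.length + 2) ^ (e.2.2 + 1))).sum
decreasing_by
  simp only [List.map_append, List.sum_append, List.map_cons, List.sum_cons]
  have hpos : 0 < (tasks.length + 2) ^ (f + 1) := Nat.pow_pos (by omega)
  cases f with
  | zero => simp only [List.map_nil, List.sum_nil]; omega
  | succ f' =>
      have hlen := pvKids_length_le tasks (pvTGetD t "name" "")
      have hconst : (((pvKids tasks (pvTGetD t "name" "")).map (fun c => (c, d + 1, f'))).map
          (fun e => (tasks.length + 2) ^ (e.2.2 + 1))).sum
          = (pvKids tasks (pvTGetD t "name" "")).length * (tasks.length + 2) ^ (f' + 1) := by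
        rw [List.map_map]
        simp only [Function.comp_def]
        rw [List.map_const', List.sum_replicate]
        simp
      rw [hconst]
      have h1 : (pvKids tasks (pvTGetD t "name" "")).length * (tasks.length + 2) ^ (f' + 1)
          < (tasks.length + 2) * (tasks.length + 2) ^ (f' + 1) :=
        Nat.mul_lt_mul_of_lt_of_le (by omega) (Nat.le_refl _) (Nat.pow_pos (by omega))
      have h2 : (tasks.length + 2) * (tasks.length + 2) ^ (f' + 1) = (tasks.length + 2) ^ (f' + 1 + 1) := by
        rw [pow_succ]; ring
      omega

def group_tasks_for_display_alt (tasks : List (List (String × String))) : List ((List (String × String)) × Int) :=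
  pvRunB tasks ((pvTopLevel tasks).map (fun t => (t, (0 : Int), tasks.length + 1))) []

-- ===== PRECONDITION & SPEC =====
-- acyclicity helpers: names reachable from n through the child relation (parent field, nonempty)
def pvGrow (tasks : List (List (String × String))) (S : List String) : List String :=
  tasks.foldl (fun S t =>
    if pvParentOf t != "" && S.contains (pvParentOf t) && !S.contains (pvTGetD t "name" "") then
      S ++ [pvTGetD t "name" ""]
    else S) S

def pvReach (tasks : List (List (String × String))) (n : String) : List String :=
  (pvGrow tasks)^[tasks.length]
    ((tasks.filter (fun t => pvParentOf t == n && pvParentOf t != "")).map (fun t => pvTGetD t "name" ""))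

-- the names A's traversal actually visits: top-level names closed under the child relation
def pvReachTop (tasks : List (List (String × String))) : List String :=
  (pvGrow tasks)^[tasks.length]
    ((tasks.filter (fun t =>
        pvParentOf t == "" || !((tasks.map (fun u => pvTGetD u "name" "")).contains (pvParentOf t)))).map
      (fun t => pvTGetD t "name" ""))

-- Pre_ excludes exactly the inputs where Python A does not return: a task missing "name", a
-- task A's traversal sorts (top-level, or child of a visited name) missing "id" (KeyError),
-- and a parent/name cycle reachable from the top level, on which A's recursion diverges.
def Pre_group_tasks_for_display (tasks : List (List (String × String))) : Prop :=
  (∀ t ∈ tasks, (PySem.Dict.mk t).contains "name" = true ∧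
    ((pvParentOf t = "" ∨ pvParentOf t ∉ tasks.map (fun u => pvTGetD u "name" "") ∨
        pvParentOf t ∈ pvReachTop tasks) → (PySem.Dict.mk t).contains "id" = true)) ∧
  (∀ t ∈ tasks, pvTGetD t "name" "" ∈ pvReachTop tasks → pvTGetD t "name" "" ∉ pvReach tasks (pvTGetD t "name" ""))

instance (tasks : List (List (String × String))) : Decidable (Pre_group_tasks_for_display tasks) := by
  unfold Pre_group_tasks_for_display; infer_instance

def pvWitness_group_tasks_for_display : (List (List (String × String))) :=
  [[("name", "a"), ("id", "1")], [("name", "b"), ("parent", "a"), ("id", "2")]]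

def Spec_group_tasks_for_display (tasks : List (List (String × String))) (out : List ((List (String × String)) × Int)) : Prop := out = group_tasks_for_display_alt tasks
instance (tasks : List (List (String × String))) (out : List ((List (String × String)) × Int)) : Decidable (Spec_group_tasks_for_display tasks out) := by unfold Spec_group_tasks_for_display; infer_instance

-- ===== CLAIM (what is proved, stated in full; the proofs are below) =====
def Claim_equal_group_tasks_for_display : Prop := ∀ (tasks : List (List (String × String))), Dom_group_tasks_for_display tasks → Pre_group_tasks_for_display tasks → Spec_group_tasks_for_display tasks (group_tasks_for_display tasks)

-- ===== LEMMAS AND PROOFS =====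

-- A's inner loop as a flatMap
lemma pvCollectA_succ (tasks : List (List (String × String))) (f : Nat) (name : String) (depth : Int) :
    pvCollectA tasks (f + 1) name depth
      = (pvKids tasks name).flatMap
          (fun c => (c, depth) :: pvCollectA tasks f (pvTGetD c "name" "") (depth + 1)) := by
  show (pvKids tasks name).foldl
      (fun r c => (r ++ [(c, depth)]) ++ pvCollectA tasks f (pvTGetD c "name" "") (depth + 1)) [] = _
  have hfun : (fun (r : List ((List (String × String)) × Int)) c =>
        (r ++ [(c, depth)]) ++ pvCollectA tasks f (pvTGetD c "name" "") (depth + 1))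
      = fun r c => r ++ ((c, depth) :: pvCollectA tasks f (pvTGetD c "name" "") (depth + 1)) := by
    funext r c; simp
  rw [hfun, PySem.List.foldl_append_eq_flatMap]
  simp

-- what one popped frame contributes: its pushed children expand to A's recursive collection
lemma pvPush_eq (tasks : List (List (String × String))) (t : List (String × String)) (d : Int) (f : Nat) :
    ((match f with
      | 0 => []
      | Nat.succ f' => (pvKids tasks (pvTGetD t "name" "")).map (fun c => (c, d + 1, f'))) :
      List ((List (String × String)) × Int × Nat)).flatMap
      (fun e => (e.1, e.2.1) :: pvCollectA tasks e.2.2 (pvTGetD e.1 "name" "") (e.2.1 + 1))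
    = pvCollectA tasks f (pvTGetD t "name" "") (d + 1) := by
  cases f with
  | zero => simp [pvCollectA]
  | succ f' =>
      rw [pvCollectA_succ]
      simp [List.flatMap_map]

-- the stack machine emits, frame by frame, exactly A's recursive expansion
lemma pvRunB_eq (tasks : List (List (String × String)))
    (st : List ((List (String × String)) × Int × Nat)) (acc : List ((List (String × String)) × Int)) :
    pvRunB tasks st acc
      = acc ++ st.flatMap (fun e => (e.1, e.2.1) :: pvCollectA tasks e.2.2 (pvTGetD e.1 "name" "") (e.2.1 + 1)) := by
  induction st, acc using pvRunB.induct tasks with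
  | case1 acc => simp [pvRunB.eq_def]
  | case2 t d f rest acc ih =>
      rw [pvRunB.eq_def]
      dsimp only
      rw [ih]
      rw [List.flatMap_append, pvPush_eq tasks t d f]
      simp

-- A's outer loop as a flatMap
lemma groupA_eq (tasks : List (List (String × String))) :
    group_tasks_for_display tasks
      = (pvTopLevel tasks).flatMap
          (fun t => (t, (0 : Int)) :: pvCollectA tasks (tasks.length + 1) (pvTGetD t "name" "") 1) := by
  show (pvTopLevel tasks).foldl
      (fun r t => (r ++ [(t, (0 : Int))]) ++ pvCollectA tasks (tasks.length + 1) (pvTGetD t "name" "") 1) [] = _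
  have hfun : (fun (r : List ((List (String × String)) × Int)) t =>
        (r ++ [(t, (0 : Int))]) ++ pvCollectA tasks (tasks.length + 1) (pvTGetD t "name" "") 1)
      = fun r t => r ++ ((t, (0 : Int)) :: pvCollectA tasks (tasks.length + 1) (pvTGetD t "name" "") 1) := by
    funext r t; simp
  rw [hfun, PySem.List.foldl_append_eq_flatMap]
  simp

-- ===== VERDICT (by name: the statement is the Claim_ definition above) =====
theorem group_tasks_for_display_spec : Claim_equal_group_tasks_for_display := by
  unfold Claim_equal_group_tasks_for_display
  intro tasks _ _
  unfold Spec_group_tasks_for_display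
  rw [groupA_eq]
  unfold group_tasks_for_display_alt
  rw [pvRunB_eq]
  simp [List.flatMap_map]
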